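-- pv_equiv track=rewrite | github.com/jarrodmillman/rcsds | tools/proc_rst.py | proc_body
-- ===== SOURCE A (Python) =====
-- def line_indent(line):
--     return len(line) - len(line.lstrip())
--
-- def is_empty(line):
--     return line.strip() == ''
--
-- def proc_body(body, indent):
--     spaces = ' ' * indent
--     new_body = ['.. plot::\n', spaces + ':context:\n']
--     plts = [line for line in body if line.strip().startswith('plt.')]
--     if len(plts) == 0:
--         new_body.append(spaces + ':nofigs:\n')
--     new_body.append('\n')
--     # Ignore trailing blank lines
--     n_good = len(body)
--     for line in body[::-1]:
--         if not is_empty(line):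
--             break
--         n_good -= 1
--
--     for line in body[:n_good]:
--         if is_empty(line):
--             new_body.append(line)
--             continue
--         if line_indent(line) == indent:
--             new_line = spaces + '>>> ' + line.lstrip()
--             new_body.append(new_line)
--             continue
--         new_line = spaces + '... ' + line.lstrip()
--         new_body.append(new_line)
--     return new_body
-- ===== SOURCE B (Python) =====
-- def proc_body(body, indent):
--     spaces = ' ' * indent
--     out = ['.. plot::\n', spaces + ':context:\n']
--     if not any(line.strip().startswith('plt.') for line in body):
--         out.append(spaces + ':nofigs:\n')
--     out.append('\n')
--     pending = []  # blank lines not yet known to be interior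
--     for line in body:
--         if line.strip() == '':
--             pending.append(line)
--         else:
--             out.extend(pending)
--             pending = []
--             prefix = '>>> ' if len(line) - len(line.lstrip()) == indent else '... '
--             out.append(spaces + prefix + line.lstrip())
--     return out  # trailing blanks in `pending` are discarded
-- ===== Notes on version B (the rewrite author's own statement) =====
-- stated objective: simpler
-- what changed: Replaces the reverse scan that counts trailing blanks plus a second sliced pass with a single forward pass keeping a 'pending' buffer of blank lines that is flushed on the next non-blank line and discarded at the end, and replaces the materialised plts list with any().
import Mathlib
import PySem

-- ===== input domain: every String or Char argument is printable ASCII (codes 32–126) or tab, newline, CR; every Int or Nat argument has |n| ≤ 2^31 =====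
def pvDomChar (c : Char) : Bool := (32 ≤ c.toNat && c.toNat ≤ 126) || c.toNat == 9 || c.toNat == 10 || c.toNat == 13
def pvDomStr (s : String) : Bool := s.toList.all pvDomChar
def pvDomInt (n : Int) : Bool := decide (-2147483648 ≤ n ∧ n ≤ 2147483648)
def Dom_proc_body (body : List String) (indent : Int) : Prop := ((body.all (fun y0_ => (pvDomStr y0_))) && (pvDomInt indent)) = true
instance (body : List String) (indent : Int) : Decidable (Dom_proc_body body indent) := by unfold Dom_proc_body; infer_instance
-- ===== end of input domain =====

-- B replaces A's reverse scan for trailing blanks + sliced second pass with one forward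
-- pass buffering pending blank lines (objective: simpler). Return values only; neither mutates.

-- ===== PORT A =====
def line_indent (line : String) : Int :=
  PySem.Str.len line - PySem.Str.len (PySem.Str.lstrip line)

def is_empty (line : String) : Bool :=
  PySem.Str.strip line == ""

-- A's `for line in body[::-1]: if not is_empty(line): break; n_good -= 1`
def pvNGoodLoop : List String → Int → Int
  | [], n => n
  | line :: rest, n =>
    if !(is_empty line) then n else pvNGoodLoop rest (n - 1)

-- A's second for-loop appending to new_body
def pvProcLoopA (spaces : String) (indent : Int) (acc : List String) : List String → List String
  | [] => acc
  | line :: rest =>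
    if is_empty line then
      pvProcLoopA spaces indent (acc ++ [line]) rest
    else if line_indent line == indent then
      pvProcLoopA spaces indent (acc ++ [spaces ++ ">>> " ++ PySem.Str.lstrip line]) rest
    else
      pvProcLoopA spaces indent (acc ++ [spaces ++ "... " ++ PySem.Str.lstrip line]) rest

def proc_body (body : List String) (indent : Int) : List String :=
  let spaces := String.ofList (List.replicate indent.toNat ' ')   -- ' ' * indent ('' for indent ≤ 0, as in Python)
  let newBody := [".. plot::\n", spaces ++ ":context:\n"]
  let plts := body.filter (fun line => PySem.Str.startswith (PySem.Str.strip line) "plt.")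
  let newBody := if plts.length = 0 then newBody ++ [spaces ++ ":nofigs:\n"] else newBody
  let newBody := newBody ++ ["\n"]
  let nGood := pvNGoodLoop ((PySem.List.slice? body none none (-1)).getD []) (PySem.List.len body)
  pvProcLoopA spaces indent newBody (PySem.List.slice body none (some nGood))

-- ===== PORT B =====
def pvFmtB (spaces : String) (indent : Int) (line : String) : String :=
  spaces ++ (if PySem.Str.len line - PySem.Str.len (PySem.Str.lstrip line) = indent then ">>> " else "... ")
    ++ PySem.Str.lstrip line

-- B's single forward pass with a pending buffer of blank lines
def pvProcLoopB (spaces : String) (indent : Int) (out pending : List String) : List String → List String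
  | [] => out
  | line :: rest =>
    if PySem.Str.strip line == "" then
      pvProcLoopB spaces indent out (pending ++ [line]) rest
    else
      pvProcLoopB spaces indent (out ++ pending ++ [pvFmtB spaces indent line]) [] rest

def proc_body_alt (body : List String) (indent : Int) : List String :=
  let spaces := String.ofList (List.replicate indent.toNat ' ')
  let out := [".. plot::\n", spaces ++ ":context:\n"]
  let out := if body.any (fun line => PySem.Str.startswith (PySem.Str.strip line) "plt.") then out
             else out ++ [spaces ++ ":nofigs:\n"]
  pvProcLoopB spaces indent (out ++ ["\n"]) [] body

-- ===== PRECONDITION & SPEC =====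
def Spec_proc_body (body : List String) (indent : Int) (out : List String) : Prop := out = proc_body_alt body indent
instance (body : List String) (indent : Int) (out : List String) : Decidable (Spec_proc_body body indent out) := by unfold Spec_proc_body; infer_instance

-- ===== CLAIM (what is proved, stated in full; the proofs are below) =====
def Claim_equal_proc_body : Prop := ∀ (body : List String) (indent : Int), Dom_proc_body body indent → Spec_proc_body body indent (proc_body body indent)

-- ===== LEMMAS AND PROOFS =====

-- the formatting A applies to one kept line
def pvG (spaces : String) (indent : Int) (line : String) : String :=
  if is_empty line then line else pvFmtB spaces indent line

-- body with its trailing blank lines removed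
def pvDropTrail (xs : List String) : List String :=
  (xs.reverse.dropWhile is_empty).reverse


theorem pvALoop_eq_map (spaces : String) (indent : Int) (acc : List String) :
    ∀ xs : List String, pvProcLoopA spaces indent acc xs = acc ++ xs.map (pvG spaces indent) := by
  intro xs
  induction xs generalizing acc with
  | nil => simp [pvProcLoopA]
  | cons l rest ih =>
    by_cases h1 : is_empty l = true
    · simp [pvProcLoopA, h1, ih, pvG]
    · simp only [pvProcLoopA, pvG, pvFmtB, line_indent, h1, if_false, List.map_cons, Bool.false_eq_true]
      by_cases h2 : (l.length : Int) - ((PySem.Chars.lstrip l.toList).length : Int) = indent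
      · simp [h2, ih]
      · simp [h2, ih]

theorem pvNGoodLoop_eq :
    ∀ (rs : List String) (n : Int), pvNGoodLoop rs n = n - (rs.takeWhile is_empty).length := by
  intro rs
  induction rs with
  | nil => simp [pvNGoodLoop]
  | cons l rest ih =>
    intro n
    by_cases h : is_empty l = true
    · simp [pvNGoodLoop, h, ih]; omega
    · simp [pvNGoodLoop, h]

theorem pvDropTrail_eq_take (xs : List String) :
    xs.take (xs.length - (xs.reverse.takeWhile is_empty).length) = pvDropTrail xs := by
  unfold pvDropTrail
  have h : xs.reverse.dropWhile is_empty = xs.reverse.drop (xs.reverse.takeWhile is_empty).length := by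
    nth_rewrite 3 [← List.takeWhile_append_dropWhile (p := is_empty) (l := xs.reverse)]
    rw [List.drop_left]
  rw [h, List.drop_reverse, List.reverse_reverse]

theorem pvDropTrail_append (xs rest : List String) (l : String) (hl : ¬ is_empty l = true) :
    pvDropTrail (xs ++ l :: rest) = xs ++ l :: pvDropTrail rest := by
  unfold pvDropTrail
  rw [show xs ++ l :: rest = (xs ++ [l]) ++ rest by simp, List.reverse_append,
      List.dropWhile_append]
  split
  · next he =>
    rw [List.isEmpty_iff] at he
    simp [List.reverse_append, hl, he]
  · next he =>
    simp [List.reverse_append]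

theorem pvBLoop_eq (spaces : String) (indent : Int) :
    ∀ (xs out pending : List String), (∀ l ∈ pending, is_empty l = true) →
      pvProcLoopB spaces indent out pending xs = out ++ (pvDropTrail (pending ++ xs)).map (pvG spaces indent) := by
  intro xs
  induction xs with
  | nil =>
    intro out pending hp
    have : pvDropTrail pending = [] := by
      unfold pvDropTrail
      have : pending.reverse.dropWhile is_empty = [] := by
        rw [List.dropWhile_eq_nil_iff]
        intro l hl; exact hp l (List.mem_reverse.mp hl)
      simp [this]
    simp [pvProcLoopB, this]
  | cons l rest ih =>
    intro out pending hp
    by_cases h : is_empty l = true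
    · have h' : (PySem.Str.strip l == "") = true := h
      rw [pvProcLoopB, if_pos h']
      rw [ih out (pending ++ [l]) (by intro x hx; rcases List.mem_append.mp hx with hx | hx
                                      · exact hp x hx
                                      · simp at hx; subst hx; exact h)]
      simp
    · have h' : ¬ (PySem.Str.strip l == "") = true := h
      rw [pvProcLoopB, if_neg h']
      rw [ih (out ++ pending ++ [pvFmtB spaces indent l]) [] (by simp)]
      have hmap : pending.map (pvG spaces indent) = pending := by
        conv_rhs => rw [← List.map_id pending]
        exact List.map_congr_left (fun x hx => by simp [pvG, hp x hx])
      rw [pvDropTrail_append pending rest l h]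
      simp [pvG, h, hmap]

theorem proc_body_spec : Claim_equal_proc_body := by
  intro body indent _
  unfold Spec_proc_body
  show proc_body body indent = proc_body_alt body indent
  simp only [proc_body, proc_body_alt]
  rw [PySem.List.slice?_none_none_neg_one, Option.getD_some, PySem.List.len_eq, pvNGoodLoop_eq]
  have ht : (body.reverse.takeWhile is_empty).length ≤ body.length := by
    calc (body.reverse.takeWhile is_empty).length ≤ body.reverse.length := List.IsPrefix.length_le (List.takeWhile_prefix _)
      _ = body.length := List.length_reverse
  rw [PySem.List.slice_to body (by omega)]
  have hnat : ((body.length : Int) - ((body.reverse.takeWhile is_empty).length : Int)).toNat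
      = body.length - (body.reverse.takeWhile is_empty).length := by omega
  rw [hnat, pvDropTrail_eq_take, pvALoop_eq_map, pvBLoop_eq _ _ body _ [] (by simp)]
  split_ifs with h1 h2 h2 <;> simp_all
  obtain ⟨x, hx, hx2⟩ := h2
  simp [h1 x hx] at hx2
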